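-- pv_equiv track=rewrite | github.com/iMahimaSingh/DSA_practice | TUF+/basic/hashing/sum-of-highest-and-lowest-frequency.py | sumHighestAndLowestFrequency
-- ===== SOURCE A (Python) =====
-- def sumHighestAndLowestFrequency(nums):
--     if len(nums)<2:
--         return 2
--     hashmap={}
--     for num in nums:
--         if num in hashmap:
--             hashmap[num]+=1
--         else:
--             hashmap[num]=1
--
--     max_freq=0
--     min_freq=len(nums)
--
--     for value in hashmap.values():
--         if value>max_freq:
--             max_freq=value
--
--         if value<min_freq:
--             min_freq=value
--     return max_freq+min_freq
-- ===== SOURCE B (Python) =====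
-- def sumHighestAndLowestFrequency(nums):
--     if len(nums) < 2:
--         return 2
--     s = sorted(nums)
--     max_freq = 0
--     min_freq = len(nums)
--     prev = s[0]
--     run = 1
--     for x in s[1:]:
--         if x == prev:
--             run += 1
--         else:
--             if run > max_freq:
--                 max_freq = run
--             if run < min_freq:
--                 min_freq = run
--             prev = x
--             run = 1
--     if run > max_freq:
--         max_freq = run
--     if run < min_freq:
--         min_freq = run
--     return max_freq + min_freq
-- ===== Notes on version B (the rewrite author's own statement) =====
-- stated objective: alternative
-- what changed: Replaces the hashmap count-then-scan with sort-then-scan: sort the list once and walk it counting maximal runs of equal consecutive values, updating max/min run length as each run ends.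
import Mathlib
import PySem

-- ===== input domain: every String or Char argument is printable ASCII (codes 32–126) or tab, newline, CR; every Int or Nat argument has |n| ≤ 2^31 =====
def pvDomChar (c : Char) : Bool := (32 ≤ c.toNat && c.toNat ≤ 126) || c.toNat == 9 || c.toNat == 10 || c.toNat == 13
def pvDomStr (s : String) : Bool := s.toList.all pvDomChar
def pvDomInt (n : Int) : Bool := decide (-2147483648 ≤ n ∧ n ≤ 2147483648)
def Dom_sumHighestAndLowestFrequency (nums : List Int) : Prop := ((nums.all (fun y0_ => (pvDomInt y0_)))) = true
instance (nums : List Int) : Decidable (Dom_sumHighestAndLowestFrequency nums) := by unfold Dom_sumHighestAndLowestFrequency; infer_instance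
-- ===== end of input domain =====

-- B replaces A's hashmap count-then-scan by sort-then-scan over maximal runs of equal
-- consecutive values (alternative strategy, same return value; neither mutates its argument).

-- ===== PORT A =====
def sumHighestAndLowestFrequency (nums : List Int) : Int :=
  if nums.length < 2 then 2
  else
    let hashmap := nums.foldl
      (fun d num => if d.contains num then d.insert num (d.getD num 0 + 1) else d.insert num 1)
      (PySem.Dict.empty : PySem.Dict Int Int)
    let p := hashmap.values.foldl
      (fun (p : Int × Int) value =>
        (if value > p.1 then value else p.1, if value < p.2 then value else p.2))
      (0, (nums.length : Int))
    p.1 + p.2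

-- ===== PORT B =====
def sumHighestAndLowestFrequency_alt (nums : List Int) : Int :=
  if nums.length < 2 then 2
  else
    -- s = sorted(nums); prev = s[0]; loop over s[1:]  (s is nonempty here, the [] arm is unreachable)
    match PySem.List.sorted nums (fun x => x) false with
    | [] => 2
    | x :: xs =>
      let st := xs.foldl
        (fun (st : Int × Int × Int × Int) y =>
          if y = st.1 then (st.1, st.2.1 + 1, st.2.2.1, st.2.2.2)
          else (y, 1,
                if st.2.1 > st.2.2.1 then st.2.1 else st.2.2.1,
                if st.2.1 < st.2.2.2 then st.2.1 else st.2.2.2))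
        (x, 1, 0, (nums.length : Int))
      (if st.2.1 > st.2.2.1 then st.2.1 else st.2.2.1) +
      (if st.2.1 < st.2.2.2 then st.2.1 else st.2.2.2)

-- ===== PRECONDITION & SPEC =====
def Spec_sumHighestAndLowestFrequency (nums : List Int) (out : Int) : Prop := out = sumHighestAndLowestFrequency_alt nums
instance (nums : List Int) (out : Int) : Decidable (Spec_sumHighestAndLowestFrequency nums out) := by unfold Spec_sumHighestAndLowestFrequency; infer_instance

-- ===== CLAIM (what is proved, stated in full; the proofs are below) =====
def Claim_equal_sumHighestAndLowestFrequency : Prop := ∀ (nums : List Int), Dom_sumHighestAndLowestFrequency nums → Spec_sumHighestAndLowestFrequency nums (sumHighestAndLowestFrequency nums)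

-- ===== LEMMAS AND PROOFS =====

-- A's max/min-update loop body, as a function on the (max_freq, min_freq) pair.
def pvStep (p : Int × Int) (v : Int) : Int × Int :=
  (if v > p.1 then v else p.1, if v < p.2 then v else p.2)

theorem pvStep_rc (p : Int × Int) (a b : Int) : pvStep (pvStep p a) b = pvStep (pvStep p b) a := by
  simp only [pvStep, Prod.mk.injEq]
  constructor <;> split_ifs <;> omega

-- the list of maximal-run lengths of `prev :: ys`, given an open run of `prev` of length `run`
def pvRuns (prev run : Int) : List Int → List Int
  | [] => [run]
  | y :: ys => if y = prev then pvRuns prev (run + 1) ys else run :: pvRuns y 1 ys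

-- B's fold followed by the final flush computes the pvStep-fold over the run lengths
theorem pvBfold (ys : List Int) : ∀ prev run mx mn,
    (fun st : Int × Int × Int × Int => pvStep (st.2.2.1, st.2.2.2) st.2.1)
      (ys.foldl
        (fun (st : Int × Int × Int × Int) y =>
          if y = st.1 then (st.1, st.2.1 + 1, st.2.2.1, st.2.2.2)
          else (y, 1,
                if st.2.1 > st.2.2.1 then st.2.1 else st.2.2.1,
                if st.2.1 < st.2.2.2 then st.2.1 else st.2.2.2))
        (prev, run, mx, mn))
    = (pvRuns prev run ys).foldl pvStep (mx, mn) := by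
  induction ys with
  | nil => intro prev run mx mn; rfl
  | cons y ys ih =>
    intro prev run mx mn
    by_cases h : y = prev
    · simp only [List.foldl_cons, pvRuns, h]
      exact ih prev (run + 1) mx mn
    · simp only [List.foldl_cons, pvRuns, if_neg h]
      exact ih y 1 _ _

theorem pvFoldlAdd (l : List Int) : ∀ s : List Int,
    l.foldl PySem.Set.add s = s ++ (PySem.List.dedup l).filter (fun x => !s.contains x) := by
  induction l with
  | nil => intro s; simp [PySem.List.dedup, PySem.Set.ofList]
  | cons x l ih =>
    intro s
    have hd : PySem.List.dedup (x :: l) = x :: (PySem.List.dedup l).filter (fun k => !([x] : List Int).contains k) := by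
      show (x :: l).foldl PySem.Set.add [] = _
      rw [List.foldl_cons]
      have h0 : PySem.Set.add ([] : List Int) x = [x] := rfl
      rw [h0, ih [x]]
      rfl
    rw [List.foldl_cons, ih, hd]
    by_cases hx : x ∈ s
    · have hadd : PySem.Set.add s x = s := by
        simp only [PySem.Set.add, PySem.Set.contains, List.contains_eq_mem, hx, decide_true, if_true]
      rw [hadd, List.filter_cons_of_neg (by simp [hx]), List.filter_filter]
      congr 1
      apply List.filter_congr
      intro k hk
      by_cases hkx : k = x
      · subst hkx; simp [hx]
      · simp [List.contains_eq_mem, hkx]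
    · have hadd : PySem.Set.add s x = s ++ [x] := by
        simp only [PySem.Set.add, PySem.Set.contains, List.contains_eq_mem, hx, decide_false,
          Bool.false_eq_true, if_false]
      rw [hadd, List.filter_cons_of_pos (by simp [hx]), List.filter_filter, List.append_assoc,
        List.singleton_append]
      congr 2
      apply List.filter_congr
      intro k hk
      by_cases hkx : k = x
      · subst hkx; simp
      · simp [List.contains_eq_mem, List.mem_append, hkx]

theorem pvDedupCons (x : Int) (l : List Int) :
    PySem.List.dedup (x :: l) = x :: (PySem.List.dedup l).filter (fun k => k != x) := by
  show (x :: l).foldl PySem.Set.add [] = _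
  rw [List.foldl_cons]
  have h0 : PySem.Set.add ([] : List Int) x = [x] := rfl
  rw [h0, pvFoldlAdd]
  simp only [List.singleton_append, List.cons.injEq, true_and]
  apply List.filter_congr
  intro k _
  by_cases hkx : k = x
  · subst hkx; simp
  · simp [List.contains_eq_mem, hkx, bne]

theorem pvRunsSpec (ys : List Int) : ∀ prev run,
    List.Pairwise (· ≤ ·) (prev :: ys) →
    pvRuns prev run ys
      = (run + (ys.count prev : Int)) ::
        ((PySem.List.dedup ys).filter (fun k => k != prev)).map (fun k => (ys.count k : Int)) := by
  induction ys with
  | nil => intro prev run _; simp [pvRuns, PySem.List.dedup, PySem.Set.ofList]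
  | cons y ys ih =>
    intro prev run hpw
    have hpw' : List.Pairwise (· ≤ ·) (y :: ys) := hpw.tail
    have hprevle : ∀ z ∈ y :: ys, prev ≤ z := fun z hz => (List.pairwise_cons.mp hpw).1 z hz
    have hyle : ∀ z ∈ ys, y ≤ z := fun z hz => (List.pairwise_cons.mp hpw').1 z hz
    by_cases h : y = prev
    · subst h
      have hstep : pvRuns y run (y :: ys) = pvRuns y (run + 1) ys := by simp [pvRuns]
      rw [hstep, ih y (run + 1) hpw', pvDedupCons]
      rw [List.filter_cons_of_neg (by simp), List.filter_filter]
      have hpp : (fun (k : Int) => (k != y) && (k != y)) = (fun k => k != y) := by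
        funext k; simp
      rw [hpp, List.count_cons_self]
      refine congrArg₂ List.cons ?_ ?_
      · push_cast; ring
      · apply List.map_eq_map_iff.mpr
        intro k hk
        have hkne : ¬ y = k := fun e => (by simpa using (List.mem_filter.mp hk).2 : k ≠ y) e.symm
        simp [hkne]
    · have hlt : prev < y := lt_of_le_of_ne (hprevle y (by simp)) (fun e => h e.symm)
      have hnotin : prev ∉ y :: ys := by
        intro hmem
        rcases List.mem_cons.mp hmem with h1 | h1
        · exact h h1.symm
        · exact absurd (hyle prev h1) (by omega)
      simp only [pvRuns, if_neg h]
      rw [ih y 1 hpw', pvDedupCons]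
      have hcnt0 : (y :: ys).count prev = 0 := List.count_eq_zero.mpr hnotin
      rw [hcnt0]
      have hfilter : (y :: (PySem.List.dedup ys).filter (fun k => k != y)).filter (fun k => k != prev)
          = y :: (PySem.List.dedup ys).filter (fun k => k != y) := by
        apply List.filter_eq_self.mpr
        intro k hk
        have hky : prev < k := by
          rcases List.mem_cons.mp hk with h1 | h1
          · subst h1; exact hlt
          · have hmem : k ∈ ys := (PySem.List.mem_dedup _ _).mp (List.mem_filter.mp h1).1
            exact lt_of_lt_of_le hlt (hyle k hmem)
        simpa using (by omega : k ≠ prev)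
      rw [hfilter]
      simp only [List.map_cons, Int.natCast_zero, add_zero, List.count_cons_self]
      push_cast
      have hhead : (1 + (ys.count y : Int)) = ((ys.count y : Int) + 1) := by ring
      have htail : ((PySem.List.dedup ys).filter (fun k => k != y)).map (fun k => ((ys.count k : Nat) : Int))
          = ((PySem.List.dedup ys).filter (fun k => k != y)).map (fun k => (((y :: ys).count k : Nat) : Int)) := by
        apply List.map_eq_map_iff.mpr
        intro k hk
        have hkne : ¬ y = k := fun e => (by simpa using (List.mem_filter.mp hk).2 : k ≠ y) e.symm
        simp [hkne]
      exact congrArg₂ List.cons rfl (congrArg₂ List.cons hhead htail)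


-- the run-length list of a whole sorted list is the counts of its distinct values, in order
theorem pvRunsDedup (x : Int) (xs : List Int)
    (hpw : List.Pairwise (· ≤ ·) (x :: xs)) :
    pvRuns x 1 xs = (PySem.List.dedup (x :: xs)).map (fun k => ((x :: xs).count k : Int)) := by
  rw [pvRunsSpec xs x 1 hpw, pvDedupCons, List.map_cons, List.count_cons_self]
  push_cast
  have hhead : (1 + (xs.count x : Int)) = ((xs.count x : Int) + 1) := by ring
  have htail : ((PySem.List.dedup xs).filter (fun k => k != x)).map (fun k => ((xs.count k : Nat) : Int))
      = ((PySem.List.dedup xs).filter (fun k => k != x)).map (fun k => (((x :: xs).count k : Nat) : Int)) := by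
    apply List.map_eq_map_iff.mpr
    intro k hk
    have hkne : ¬ x = k := fun e => (by simpa using (List.mem_filter.mp hk).2 : k ≠ x) e.symm
    simp [hkne]
  exact congrArg₂ List.cons hhead htail

-- ===== VERDICT (by name: the statement is the Claim_ definition above) =====
theorem sumHighestAndLowestFrequency_spec : Claim_equal_sumHighestAndLowestFrequency := by
  intro nums _
  unfold Spec_sumHighestAndLowestFrequency sumHighestAndLowestFrequency sumHighestAndLowestFrequency_alt
  by_cases h2 : nums.length < 2
  · simp [h2]
  · rw [if_neg h2, if_neg h2]
    rcases hs : PySem.List.sorted nums (fun x => x) false with _ | ⟨x, xs⟩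
    · exact absurd ((PySem.List.sorted_eq_nil_iff nums (fun x => x) false).mp hs)
        (by intro h; subst h; simp at h2)
    · -- A's counting loop builds the Counter
      have hcnt : nums.foldl
          (fun d num => if d.contains num then d.insert num (d.getD num 0 + 1) else d.insert num 1)
          (PySem.Dict.empty : PySem.Dict Int Int) = PySem.Dict.counter nums := by
        rw [← PySem.Dict.foldl_insert_getD_add_one_eq_counter]
        congr 1
        funext d num
        by_cases hc : d.contains num = true
        · rw [if_pos hc]
        · rw [if_neg hc, PySem.Dict.getD_of_not_contains d 0 (by simpa using hc)]
          norm_num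
      -- its values are the counts of the distinct values of nums
      have hvals : (PySem.Dict.counter nums).values
          = (PySem.List.dedup nums).map (fun k => ((nums.count k : Nat) : Int)) := by
        show ((PySem.Dict.counter nums).items).map (·.2) = _
        rw [PySem.Dict.items_counter, List.map_map]
        simp [Function.comp]
      have hpw : List.Pairwise (· ≤ ·) (x :: xs) := by
        have hp := PySem.List.sorted_pairwise nums (fun x => x)
        rw [hs] at hp
        simpa using hp
      have hperm : (x :: xs).Perm nums := by
        have hp := PySem.List.sorted_perm nums (fun x => x) false
        rwa [hs] at hp
      -- the two frequency lists are permutations of each other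
      have hmapperm : ((PySem.List.dedup (x :: xs)).map (fun k => ((x :: xs).count k : Int))).Perm
          ((PySem.List.dedup nums).map (fun k => ((nums.count k : Nat) : Int))) := by
        have hcounts : (PySem.List.dedup (x :: xs)).map (fun k => ((x :: xs).count k : Int))
            = (PySem.List.dedup (x :: xs)).map (fun k => ((nums.count k : Nat) : Int)) := by
          apply List.map_eq_map_iff.mpr
          intro k _
          rw [hperm.count_eq]
        rw [hcounts]
        apply List.Perm.map
        apply (List.perm_ext_iff_of_nodup (PySem.List.nodup_dedup _) (PySem.List.nodup_dedup _)).mpr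
        intro a
        rw [PySem.List.mem_dedup, PySem.List.mem_dedup, hperm.mem_iff]
      haveI : RightCommutative pvStep := ⟨fun p a b => pvStep_rc p a b⟩
      have key : ((PySem.List.dedup nums).map fun k => ((nums.count k : Nat) : Int)).foldl pvStep
            (0, (nums.length : Int))
          = (pvRuns x 1 xs).foldl pvStep (0, (nums.length : Int)) := by
        rw [pvRunsDedup x xs hpw]
        exact (hmapperm.foldl_eq _).symm
      have hb := pvBfold xs x 1 0 (nums.length : Int)
      have hb1 := congrArg Prod.fst hb
      have hb2 := congrArg Prod.snd hb
      dsimp only [pvStep] at hb1 hb2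
      dsimp only
      rw [hcnt, hvals, hb1, hb2,
        show (fun (p : Int × Int) value =>
          (if value > p.1 then value else p.1, if value < p.2 then value else p.2)) = pvStep from rfl,
        key]
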